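-- pv_equiv track=rewrite | github.com/DarkOnGithub/Advent-of-code | 2024/14/day14.py | quandrant
-- ===== SOURCE A (Python) =====
-- from typing import List, Tuple, Set
--
-- def project_bot_position(x: int, y: int, velocity_x: int, velocity_y: int, time_step: int, grid_width: int, grid_height: int) -> Tuple[int, int]:
--     projected_x = (x + velocity_x * time_step) % grid_width - grid_width // 2
--     projected_y = (y + velocity_y * time_step) % grid_height - grid_height // 2
--     return projected_x, projected_y
--
-- def quandrant(bots: List[List[int]], grid_width: int, grid_height: int, time_step: int) -> int:
--     quadrant_counts = [0, 0, 0, 0]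
--     for bot in bots:
--         x, y = project_bot_position(*bot, time_step, grid_width, grid_height)
--         if x > 0 and y > 0:
--             quadrant_counts[0] += 1
--         elif x > 0 and y < 0:
--             quadrant_counts[1] += 1
--         elif x < 0 and y > 0:
--             quadrant_counts[2] += 1
--         elif x < 0 and y < 0:
--             quadrant_counts[3] += 1
--
--     return quadrant_counts[0] * quadrant_counts[1] * quadrant_counts[2] * quadrant_counts[3]
-- ===== SOURCE B (Python) =====
-- def quandrant(bots, grid_width, grid_height, time_step):
--     # Divide-and-conquer: a bot's quadrant is decided by comparing its wrapped
--     # coordinates against the grid midlines directly (no recentering needed,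
--     # since A's recentered coordinate is exactly wrapped - midline).
--     half_w = grid_width // 2
--     half_h = grid_height // 2
--
--     def counts(bs):
--         if not bs:
--             return (0, 0, 0, 0)
--         if len(bs) == 1:
--             x, y, vx, vy = bs[0]
--             m = (x + vx * time_step) % grid_width
--             n = (y + vy * time_step) % grid_height
--             if m == half_w or n == half_h:
--                 return (0, 0, 0, 0)
--             q = (0 if m > half_w else 2) + (0 if n > half_h else 1)
--             return tuple(int(i == q) for i in range(4))
--         mid = len(bs) // 2
--         left = counts(bs[:mid])
--         right = counts(bs[mid:])
--         return tuple(l + r for l, r in zip(left, right))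
--
--     c = counts(bots)
--     return c[0] * c[1] * c[2] * c[3]
-- ===== Notes on version B (the rewrite author's own statement) =====
-- stated objective: alternative
-- what changed: Replaces A's single interleaved classify-and-tally loop over a mutable 4-slot counter with a divide-and-conquer recursion that splits the bot list in halves and merges 4-tuples of counts, and classifies each bot by comparing its wrapped coordinates directly against the grid midlines (no recentering subtraction) via an arithmetic quadrant index.
import Mathlib
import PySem

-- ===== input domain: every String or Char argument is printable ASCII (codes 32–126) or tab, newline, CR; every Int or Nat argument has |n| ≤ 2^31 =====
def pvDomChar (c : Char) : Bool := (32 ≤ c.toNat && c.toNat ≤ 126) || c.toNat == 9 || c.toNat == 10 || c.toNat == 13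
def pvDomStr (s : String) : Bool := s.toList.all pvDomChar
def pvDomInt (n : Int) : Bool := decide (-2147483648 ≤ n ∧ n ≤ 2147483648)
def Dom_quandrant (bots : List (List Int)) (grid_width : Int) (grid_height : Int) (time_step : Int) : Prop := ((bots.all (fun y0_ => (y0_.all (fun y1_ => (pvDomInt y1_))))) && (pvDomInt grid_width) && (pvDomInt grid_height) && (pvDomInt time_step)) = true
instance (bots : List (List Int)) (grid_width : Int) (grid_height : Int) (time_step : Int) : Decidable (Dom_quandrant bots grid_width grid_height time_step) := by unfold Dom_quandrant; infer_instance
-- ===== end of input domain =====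

-- B replaces A's single interleaved classify-and-tally loop by a divide-and-conquer
-- recursion merging 4-tuples of counts, classifying against grid midlines directly
-- (alternative decomposition; same cost).

-- ===== PORT A =====
def project_bot_position (x y velocity_x velocity_y time_step grid_width grid_height : Int) : Int × Int :=
  (PySem.Int.mod (x + velocity_x * time_step) grid_width - PySem.Int.floordiv grid_width 2,
   PySem.Int.mod (y + velocity_y * time_step) grid_height - PySem.Int.floordiv grid_height 2)

def quandrant (bots : List (List Int)) (grid_width : Int) (grid_height : Int) (time_step : Int) : Int :=
  let counts := bots.foldl (fun (q : Int × Int × Int × Int) bot =>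
    match bot with
    | [x, y, vx, vy] =>
      let p := project_bot_position x y vx vy time_step grid_width grid_height
      if p.1 > 0 ∧ p.2 > 0 then (q.1 + 1, q.2.1, q.2.2.1, q.2.2.2)
      else if p.1 > 0 ∧ p.2 < 0 then (q.1, q.2.1 + 1, q.2.2.1, q.2.2.2)
      else if p.1 < 0 ∧ p.2 > 0 then (q.1, q.2.1, q.2.2.1 + 1, q.2.2.2)
      else if p.1 < 0 ∧ p.2 < 0 then (q.1, q.2.1, q.2.2.1, q.2.2.2 + 1)
      else q
    | _ => q)  -- unreachable under Pre_ (Python raises on a bot not of length 4)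
    (0, 0, 0, 0)
  counts.1 * counts.2.1 * counts.2.2.1 * counts.2.2.2

-- ===== PORT B =====
-- leaf of Source B's counts: one bot's 4-tuple, classified by comparing the wrapped
-- coordinates against the midlines; rows not of length 4 raise in Python (outside Pre_)
def pvLeaf (gw gh ts hw hh : Int) (bot : List Int) : Int × Int × Int × Int :=
  -- 'x, y, vx, vy = bs[0]' ported as guarded indexing (exact on length-4 rows;
  -- Python raises on any other row, excluded by Pre_)
  if bot.length = 4 then
    let m := PySem.Int.mod (bot[0]! + bot[2]! * ts) gw
    let n := PySem.Int.mod (bot[1]! + bot[3]! * ts) gh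
    if m = hw ∨ n = hh then (0, 0, 0, 0)
    else
      let q : Int := (if m > hw then 0 else 2) + (if n > hh then 0 else 1)
      -- 'tuple(int(i == q) for i in range(4))' written out entrywise
      (if q = 0 then 1 else 0, if q = 1 then 1 else 0, if q = 2 then 1 else 0, if q = 3 then 1 else 0)
  else (0, 0, 0, 0)

-- Source B's recursive counts: split the list in halves and add the 4-tuples componentwise
def pvCounts (gw gh ts hw hh : Int) (bs : List (List Int)) : Int × Int × Int × Int :=
  if h0 : bs = [] then (0, 0, 0, 0)
  else if h1 : bs.length = 1 then pvLeaf gw gh ts hw hh bs.headI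
  else
    let mid := bs.length / 2
    let l := pvCounts gw gh ts hw hh (bs.take mid)
    let r := pvCounts gw gh ts hw hh (bs.drop mid)
    (l.1 + r.1, l.2.1 + r.2.1, l.2.2.1 + r.2.2.1, l.2.2.2 + r.2.2.2)
termination_by bs.length
decreasing_by
  all_goals
    have hne : bs.length ≠ 0 := by simpa using h0
    simp only [List.length_take, List.length_drop]
    omega

def quandrant_alt (bots : List (List Int)) (grid_width : Int) (grid_height : Int) (time_step : Int) : Int :=
  let half_w := PySem.Int.floordiv grid_width 2
  let half_h := PySem.Int.floordiv grid_height 2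
  let c := pvCounts grid_width grid_height time_step half_w half_h bots
  c.1 * c.2.1 * c.2.2.1 * c.2.2.2

-- ===== PRECONDITION & SPEC =====
-- Pre_ excludes exactly the inputs where Python A raises: a bot row not of length 4
-- (unpacking error), or a zero grid dimension with at least one bot (ZeroDivisionError in %).
def Pre_quandrant (bots : List (List Int)) (grid_width : Int) (grid_height : Int) (time_step : Int) : Prop :=
  (∀ bot ∈ bots, bot.length = 4) ∧ (bots = [] ∨ (grid_width ≠ 0 ∧ grid_height ≠ 0))
instance (bots : List (List Int)) (grid_width : Int) (grid_height : Int) (time_step : Int) : Decidable (Pre_quandrant bots grid_width grid_height time_step) := by unfold Pre_quandrant; infer_instance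

def pvWitness_quandrant : List (List Int) × Int × Int × Int :=
  ([[0, 4, 3, -3], [6, 3, -1, -3], [9, 5, 2, 3]], 11, 7, 100)

def Spec_quandrant (bots : List (List Int)) (grid_width : Int) (grid_height : Int) (time_step : Int) (out : Int) : Prop := out = quandrant_alt bots grid_width grid_height time_step
instance (bots : List (List Int)) (grid_width : Int) (grid_height : Int) (time_step : Int) (out : Int) : Decidable (Spec_quandrant bots grid_width grid_height time_step out) := by unfold Spec_quandrant; infer_instance

-- ===== CLAIM (what is proved, stated in full; the proofs are below) =====
def Claim_equal_quandrant : Prop := ∀ (bots : List (List Int)) (grid_width : Int) (grid_height : Int) (time_step : Int), Dom_quandrant bots grid_width grid_height time_step → Pre_quandrant bots grid_width grid_height time_step → Spec_quandrant bots grid_width grid_height time_step (quandrant bots grid_width grid_height time_step)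

-- ===== LEMMAS AND PROOFS =====

-- Proof-only helpers: a named copy of A's loop body, and componentwise 4-tuple sums.
def pvStepA (gw gh ts : Int) (q : Int × Int × Int × Int) (bot : List Int) : Int × Int × Int × Int :=
  match bot with
  | [x, y, vx, vy] =>
    let p := project_bot_position x y vx vy ts gw gh
    if p.1 > 0 ∧ p.2 > 0 then (q.1 + 1, q.2.1, q.2.2.1, q.2.2.2)
    else if p.1 > 0 ∧ p.2 < 0 then (q.1, q.2.1 + 1, q.2.2.1, q.2.2.2)
    else if p.1 < 0 ∧ p.2 > 0 then (q.1, q.2.1, q.2.2.1 + 1, q.2.2.2)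
    else if p.1 < 0 ∧ p.2 < 0 then (q.1, q.2.1, q.2.2.1, q.2.2.2 + 1)
    else q
  | _ => q

def pvVAdd (a b : Int × Int × Int × Int) : Int × Int × Int × Int :=
  (a.1 + b.1, a.2.1 + b.2.1, a.2.2.1 + b.2.2.1, a.2.2.2 + b.2.2.2)

def pvVSum (l : List (Int × Int × Int × Int)) : Int × Int × Int × Int :=
  l.foldr pvVAdd (0, 0, 0, 0)

theorem pvVAdd_assoc (a b c : Int × Int × Int × Int) :
    pvVAdd (pvVAdd a b) c = pvVAdd a (pvVAdd b c) := by
  simp [pvVAdd]; omega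

theorem pvVSum_append (l1 l2 : List (Int × Int × Int × Int)) :
    pvVSum (l1 ++ l2) = pvVAdd (pvVSum l1) (pvVSum l2) := by
  induction l1 with
  | nil => simp [pvVSum, pvVAdd]
  | cons a t ih => simp only [List.cons_append, pvVSum, List.foldr_cons] at *; rw [ih, pvVAdd_assoc]

-- B's divide-and-conquer recursion computes the componentwise sum of the leaf vectors.
theorem pvCounts_eq_vsum (gw gh ts hw hh : Int) (bs : List (List Int)) :
    pvCounts gw gh ts hw hh bs = pvVSum (bs.map (pvLeaf gw gh ts hw hh)) := by
  fun_induction pvCounts gw gh ts hw hh bs with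
  | case1 => simp [pvVSum]
  | case2 bs h0 h1 =>
    match bs, h1 with
    | [b], _ => simp [pvVSum, pvVAdd, List.headI]
  | case3 bs h0 h1 mid l r ih1 ih2 =>
    simp only [l, r, mid, ih1, ih2]
    have hsplit : bs.map (pvLeaf gw gh ts hw hh) =
        (bs.take (bs.length / 2)).map (pvLeaf gw gh ts hw hh) ++
        (bs.drop (bs.length / 2)).map (pvLeaf gw gh ts hw hh) := by
      rw [← List.map_append, List.take_append_drop]
    rw [hsplit, pvVSum_append]
    simp [pvVAdd]

-- pvLeaf on a four-element row with the lets written out (definitional).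
theorem pvLeaf_cons (gw gh ts hw hh x y vx vy : Int) :
    pvLeaf gw gh ts hw hh [x, y, vx, vy] =
      (if PySem.Int.mod (x + vx * ts) gw = hw ∨ PySem.Int.mod (y + vy * ts) gh = hh then (0, 0, 0, 0)
       else
         ((if ((if PySem.Int.mod (x + vx * ts) gw > hw then (0:Int) else 2) + (if PySem.Int.mod (y + vy * ts) gh > hh then (0:Int) else 1)) = 0 then 1 else 0,
           if ((if PySem.Int.mod (x + vx * ts) gw > hw then (0:Int) else 2) + (if PySem.Int.mod (y + vy * ts) gh > hh then (0:Int) else 1)) = 1 then 1 else 0,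
           if ((if PySem.Int.mod (x + vx * ts) gw > hw then (0:Int) else 2) + (if PySem.Int.mod (y + vy * ts) gh > hh then (0:Int) else 1)) = 2 then 1 else 0,
           if ((if PySem.Int.mod (x + vx * ts) gw > hw then (0:Int) else 2) + (if PySem.Int.mod (y + vy * ts) gh > hh then (0:Int) else 1)) = 3 then 1 else 0))) := rfl

-- One step of A's loop adds the corresponding leaf vector componentwise.
theorem pvStepA_eq (gw gh ts : Int) (q : Int × Int × Int × Int) (bot : List Int) :
    pvStepA gw gh ts q bot =
      pvVAdd q (pvLeaf gw gh ts (PySem.Int.floordiv gw 2) (PySem.Int.floordiv gh 2) bot) := by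
  obtain ⟨qa, qb, qc, qd⟩ := q
  match bot with
  | [x, y, vx, vy] =>
    rw [pvLeaf_cons]
    simp only [pvStepA, pvVAdd, project_bot_position]
    generalize PySem.Int.mod (x + vx * ts) gw = m
    generalize PySem.Int.mod (y + vy * ts) gh = n
    generalize PySem.Int.floordiv gw 2 = hw
    generalize PySem.Int.floordiv gh 2 = hh
    split_ifs <;> simp <;> omega
  | [] => simp [pvStepA, pvLeaf, pvVAdd]
  | [_] => simp [pvStepA, pvLeaf, pvVAdd]
  | [_, _] => simp [pvStepA, pvLeaf, pvVAdd]
  | [_, _, _] => simp [pvStepA, pvLeaf, pvVAdd]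
  | _ :: _ :: _ :: _ :: _ :: rest => simp [pvStepA, pvLeaf, pvVAdd]

-- The loop invariant: A's fold from any accumulator adds the sum of the leaf vectors.
theorem pvFoldA_eq (gw gh ts : Int) (bs : List (List Int)) :
    ∀ acc : Int × Int × Int × Int,
      bs.foldl (pvStepA gw gh ts) acc =
        pvVAdd acc (pvVSum (bs.map (pvLeaf gw gh ts (PySem.Int.floordiv gw 2) (PySem.Int.floordiv gh 2)))) := by
  induction bs with
  | nil => intro acc; simp [pvVSum, pvVAdd]
  | cons b t ih =>
    intro acc
    simp only [List.foldl_cons, List.map_cons, pvVSum, List.foldr_cons, pvStepA_eq]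
    rw [ih, pvVAdd_assoc]
    rfl

theorem quandrant_eq_fold (bots : List (List Int)) (gw gh ts : Int) :
    quandrant bots gw gh ts =
      (let c := bots.foldl (pvStepA gw gh ts) (0, 0, 0, 0)
       c.1 * c.2.1 * c.2.2.1 * c.2.2.2) := rfl

-- ===== VERDICT (by name: the statement is the Claim_ definition above) =====
theorem quandrant_spec : Claim_equal_quandrant := by
  intro bots gw gh ts _ _
  unfold Spec_quandrant
  simp only [quandrant_alt, quandrant_eq_fold, pvCounts_eq_vsum, pvFoldA_eq]
  simp [pvVAdd]
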